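-- pv_equiv track=rewrite | github.com/PaulinhoRDC/LaboratoriosDeAlgoritmia-II | Torneios/Torneio2.py | indexrepeat
-- ===== SOURCE A (Python) =====
-- def indexrepeat(lst):
--
--     if len ( lst ) == 1:
--         return [0]
--
--     l = []
--     d = {}
--
--     l.append(lst[0])
--     d[0] = [0]
--
--     if lst[1] > lst[0]:
--
--         l.append(lst[1])
--         d[1] = [1]
--
--     else:
--
--         l.append(lst[0])
--         d[1] = [0]
--
--
--     for i in range ( 2 , len(lst)):
--
--         if l[i-1] > l[i-2] + lst[i]:
--
--             l.append(l[i-1])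
--             d[i] = d[i-1].copy()
--
--         if l[i-1] <= l[i-2] + lst[i]:
--
--             l.append( l[i-2] + lst[i])
--             d[i] = d[i-2].copy()
--             d[i].append ( i )
--
--         if lst[i] > l[i]:
--
--             l.append(lst[i])
--             d[i] = [i]
--
--     return d[len(lst) - 1]
-- ===== SOURCE B (Python) =====
-- def indexrepeat(lst):
--     # parent/branch pointers + single backward reconstruction instead of copying
--     # whole index lists into a dict at every step (O(n) vs O(n^2))
--     n = len(lst)
--     if n == 1:
--         return [0]
--     l = [lst[0], lst[1] if lst[1] > lst[0] else lst[0]]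
--     ch = ['R', 'R' if lst[1] > lst[0] else 'P']
--     for i in range(2, n):
--         a, b = l[i - 1], l[i - 2]
--         if a > b + lst[i]:
--             l.append(a)
--             c = 'P'
--         else:
--             l.append(b + lst[i])
--             c = 'T'
--         if lst[i] > l[i]:
--             l.append(lst[i])
--             c = 'R'
--         ch.append(c)
--     path = []
--     i = n - 1
--     while True:
--         c = ch[i]
--         if c == 'P':
--             i -= 1
--         elif c == 'T':
--             path.append(i)
--             i -= 2
--         else:
--             path.append(i)
--             break
--     return path[::-1]
-- ===== Notes on version B (the rewrite author's own statement) =====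
-- stated objective: faster
-- what changed: Replace the dict that stores a full copy of the best index path at every position (copied on each step) with a one-char branch tag per position plus a single backward parent-pointer reconstruction of the path at the end.
import Mathlib
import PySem

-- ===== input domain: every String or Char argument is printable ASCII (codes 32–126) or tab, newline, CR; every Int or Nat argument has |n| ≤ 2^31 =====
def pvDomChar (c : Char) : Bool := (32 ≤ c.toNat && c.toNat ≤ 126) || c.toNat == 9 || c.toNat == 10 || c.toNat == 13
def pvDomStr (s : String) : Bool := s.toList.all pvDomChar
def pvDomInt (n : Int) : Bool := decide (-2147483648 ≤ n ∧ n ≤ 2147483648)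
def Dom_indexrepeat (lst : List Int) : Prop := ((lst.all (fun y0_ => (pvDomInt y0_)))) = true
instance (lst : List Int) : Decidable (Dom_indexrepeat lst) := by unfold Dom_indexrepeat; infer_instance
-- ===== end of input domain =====

-- B replaces A's per-step copying of whole index paths into a dict by one branch tag per
-- position plus a single backward parent-pointer reconstruction of the returned path.


-- ===== PORT A =====
-- loop body of A's 'for i in range(2, len(lst))'; state = (l, d)
def stepA (lst : List Int) (s : List Int × PySem.Dict Int (List Int)) (i : Int) :
    List Int × PySem.Dict Int (List Int) :=
  let l := s.1
  let d := s.2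
  let (l, d) :=
    if PySem.List.pyGetD l (i - 1) 0 > PySem.List.pyGetD l (i - 2) 0 + PySem.List.pyGetD lst i 0 then
      (l ++ [PySem.List.pyGetD l (i - 1) 0], d.insert i (d.getD (i - 1) []))
    else (l, d)
  let (l, d) :=
    if PySem.List.pyGetD l (i - 1) 0 ≤ PySem.List.pyGetD l (i - 2) 0 + PySem.List.pyGetD lst i 0 then
      (l ++ [PySem.List.pyGetD l (i - 2) 0 + PySem.List.pyGetD lst i 0],
       d.insert i (d.getD (i - 2) [] ++ [i]))
    else (l, d)
  if PySem.List.pyGetD lst i 0 > PySem.List.pyGetD l i 0 then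
    (l ++ [PySem.List.pyGetD lst i 0], d.insert i [i])
  else (l, d)

-- all list indices A uses are provably in range under Pre_ (lst ≠ []), so pyGetD is exact
def indexrepeat (lst : List Int) : List Int :=
  if PySem.List.len lst = 1 then [0]
  else
    let l : List Int := [] ++ [PySem.List.pyGetD lst 0 0]
    let d : PySem.Dict Int (List Int) := (PySem.Dict.empty).insert 0 [0]
    let (l, d) :=
      if PySem.List.pyGetD lst 1 0 > PySem.List.pyGetD lst 0 0 then
        (l ++ [PySem.List.pyGetD lst 1 0], d.insert 1 [1])
      else (l ++ [PySem.List.pyGetD lst 0 0], d.insert 1 [0])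
    let (l, d) := (PySem.List.pyRange 2 (PySem.List.len lst) 1).foldl (stepA lst) (l, d)
    d.getD (PySem.List.len lst - 1) []

-- ===== PORT B =====
-- Source B's while loop: walk the branch tags from position i downwards, collecting the taken
-- indices. The 'P' case at index 0 and the 'T' cases at indices 0/1 are unreachable for the
-- tag lists B builds (tag 0 is always 'R'; 'T' is only written at i ≥ 2): there the walk
-- simply ends, as a totality guard.
def rebuild (ch : List Char) : Nat → List Int → List Int
  | 0, path =>
      if ch.getD 0 'R' = 'P' then path else path ++ [(0 : Int)]
  | 1, path =>
      let c := ch.getD 1 'R'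
      if c = 'P' then rebuild ch 0 path
      else path ++ [(1 : Int)]
  | (i + 2), path =>
      let c := ch.getD (i + 2) 'R'
      if c = 'P' then rebuild ch (i + 1) path
      else if c = 'T' then rebuild ch i (path ++ [((i : Int) + 2)])
      else path ++ [((i : Int) + 2)]

-- loop body of Source B's 'for i in range(2, n)'; state = (l, ch)
def stepB (lst : List Int) (s : List Int × List Char) (i : Int) : List Int × List Char :=
  let l := s.1
  let ch := s.2
  let a := PySem.List.pyGetD l (i - 1) 0
  let b := PySem.List.pyGetD l (i - 2) 0
  let (l, c) :=
    if a > b + PySem.List.pyGetD lst i 0 then (l ++ [a], 'P')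
    else (l ++ [b + PySem.List.pyGetD lst i 0], 'T')
  let (l, c) :=
    if PySem.List.pyGetD lst i 0 > PySem.List.pyGetD l i 0 then
      (l ++ [PySem.List.pyGetD lst i 0], 'R')
    else (l, c)
  (l, ch ++ [c])

def indexrepeat_alt (lst : List Int) : List Int :=
  let n := PySem.List.len lst
  if n = 1 then [0]
  else
    let x0 := PySem.List.pyGetD lst 0 0
    let x1 := PySem.List.pyGetD lst 1 0
    let l : List Int := [x0, if x1 > x0 then x1 else x0]
    let ch : List Char := ['R', if x1 > x0 then 'R' else 'P']
    let (l, ch) := (PySem.List.pyRange 2 n 1).foldl (stepB lst) (l, ch)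
    -- path[::-1] is List.reverse (PySem.List.slice?_none_none_neg_one)
    (rebuild ch (n - 1).toNat []).reverse

-- ===== PRECONDITION & SPEC =====
-- Pre_ excludes only the empty list, on which A raises IndexError reading the first element.
def Pre_indexrepeat (lst : List Int) : Prop := lst ≠ []
instance (lst : List Int) : Decidable (Pre_indexrepeat lst) := by unfold Pre_indexrepeat; infer_instance
def pvWitness_indexrepeat : List Int := ([1, -2, 3, 4, -1])

def Spec_indexrepeat (lst : List Int) (out : List Int) : Prop := out = indexrepeat_alt lst
instance (lst : List Int) (out : List Int) : Decidable (Spec_indexrepeat lst out) := by unfold Spec_indexrepeat; infer_instance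

-- ===== CLAIM (what is proved, stated in full; the proofs are below) =====
def Claim_equal_indexrepeat : Prop :=
  ∀ (lst : List Int), Dom_indexrepeat lst → Pre_indexrepeat lst → Spec_indexrepeat lst (indexrepeat lst)

-- ===== LEMMAS AND PROOFS =====

-- the walk from j only reads tags at indices ≤ j, so extending ch does not change it
theorem rebuild_append (ch cs : List Char) :
    ∀ (j : Nat), j < ch.length → ∀ (p : List Int), rebuild (ch ++ cs) j p = rebuild ch j p := by
  intro j
  induction j using Nat.strong_induction_on with
  | _ j ih =>
    intro hj p
    have hg : (ch ++ cs).getD j 'R' = ch.getD j 'R' := by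
      simp [List.getD_eq_getElem?_getD, List.getElem?_append_left hj]
    match j with
    | 0 => simp only [rebuild, hg]
    | 1 =>
      have hg0 : (ch ++ cs).getD 0 'R' = ch.getD 0 'R' := by
        simp [List.getD_eq_getElem?_getD, List.getElem?_append_left (show 0 < ch.length by omega)]
      simp only [rebuild, hg, hg0]
    | (i + 2) =>
      simp only [rebuild, hg]
      split_ifs with h1 h2
      · exact ih (i + 1) (by omega) (by omega) p
      · exact ih i (by omega) (by omega) _
      · rfl

-- the accumulator is a prefix of the walk's result
theorem rebuild_acc (ch : List Char) :
    ∀ (j : Nat) (p : List Int), rebuild ch j p = p ++ rebuild ch j [] := by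
  intro j
  induction j using Nat.strong_induction_on with
  | _ j ih =>
    intro p
    match j with
    | 0 => simp only [rebuild]; split_ifs <;> simp
    | 1 =>
      simp only [rebuild]
      split_ifs <;> simp
    | (i + 2) =>
      simp only [rebuild]
      split_ifs with h1 h2
      · exact ih (i + 1) (by omega) p
      · rw [ih i (by omega) (p ++ _), ih i (by omega) ([] ++ _)]
        simp
      · simp

-- the walk started at a newly appended tag
theorem rebuild_last (ch : List Char) (c : Char) (p : List Int) :
    rebuild (ch ++ [c]) ch.length p =
      if c = 'P' then (if ch.length = 0 then p else rebuild ch (ch.length - 1) p)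
      else if c = 'T' then
        (if ch.length ≤ 1 then p ++ [(ch.length : Int)]
         else rebuild ch (ch.length - 2) (p ++ [(ch.length : Int)]))
      else p ++ [(ch.length : Int)] := by
  have hc : (ch ++ [c]).getD ch.length 'R' = c := by
    simp [List.getD_eq_getElem?_getD]
  rcases hL : ch.length with _ | n
  · rw [hL] at hc
    simp only [rebuild, hc]
    split_ifs <;> simp_all
  · rcases n with _ | m
    · obtain ⟨a, rfl⟩ := List.length_eq_one_iff.mp hL
      simp only [rebuild]
      split_ifs <;> simp_all
    · rw [hL] at hc
      have hcast : ((m + 1 + 1 : Nat) : Int) = (m : Int) + 2 := by push_cast; ring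
      simp only [rebuild, hc]
      split_ifs with h1 h2 h3 h4 <;> subst_vars
      · exact h2.elim
      · exact rebuild_append ch ['P'] (m + 1) (by omega) p
      · exact absurd h4 (by omega)
      · rw [hcast]
        exact rebuild_append ch ['T'] m (by omega) _
      · rw [hcast]

-- joint invariant of A's (l, d) and B's (l, ch) loop states
def InvAB (sA : List Int × PySem.Dict Int (List Int)) (sB : List Int × List Char) : Prop :=
  sA.1 = sB.1 ∧ 2 ≤ sB.2.length ∧ sB.2.length ≤ sB.1.length ∧
  ∀ j : Nat, j < sB.2.length → sA.2.getD (j : Int) [] = (rebuild sB.2 j []).reverse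

theorem pyGetD_append_lt (l : List Int) (v : Int) (n : Nat) (h : n < l.length) :
    PySem.List.pyGetD (l ++ [v]) (n : Int) 0 = PySem.List.pyGetD l (n : Int) 0 := by
  simp [List.getD_eq_getElem?_getD, List.getElem?_append_left h]

theorem inv4_update (d : PySem.Dict Int (List Int)) (ch : List Char) (c : Char) (v : List Int)
    (hd : ∀ j : Nat, j < ch.length → d.getD (j : Int) [] = (rebuild ch j []).reverse)
    (hv : v = (rebuild (ch ++ [c]) ch.length []).reverse) :
    ∀ j : Nat, j < (ch ++ [c]).length →
      (d.insert (ch.length : Int) v).getD (j : Int) [] = (rebuild (ch ++ [c]) j []).reverse := by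
  intro j hj
  rw [PySem.Dict.getD_insert]
  by_cases hjL : j = ch.length
  · subst hjL
    simp [hv]
  · rw [if_neg (by exact_mod_cast hjL)]
    have hjlt : j < ch.length := by simp at hj; omega
    rw [hd j hjlt, rebuild_append ch [c] j hjlt]

theorem step_inv (lst : List Int) (sA : List Int × PySem.Dict Int (List Int))
    (sB : List Int × List Char) (h : InvAB sA sB) :
    InvAB (stepA lst sA (sB.2.length : Int)) (stepB lst sB (sB.2.length : Int)) ∧
    (stepB lst sB (sB.2.length : Int)).2.length = sB.2.length + 1 := by
  obtain ⟨l, d⟩ := sA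
  obtain ⟨l', ch⟩ := sB
  obtain ⟨hl, h2, hlen, hd⟩ := h
  simp only at hl h2 hlen hd
  subst hl
  have hi1 : ((ch.length : Int) - 1) = ((ch.length - 1 : Nat) : Int) := by omega
  have hi2 : ((ch.length : Int) - 2) = ((ch.length - 2 : Nat) : Int) := by omega
  simp only [stepA, stepB, hi1, hi2, PySem.List.pyGetD_natCast]
  by_cases hc1 : l.getD (ch.length - 1) 0 > l.getD (ch.length - 2) 0 + lst.getD ch.length 0
  · have hnc1 : ¬ (l ++ [l.getD (ch.length - 1) 0]).getD (ch.length - 1) 0 ≤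
        (l ++ [l.getD (ch.length - 1) 0]).getD (ch.length - 2) 0 + lst.getD ch.length 0 := by
      have e1 := pyGetD_append_lt l (l.getD (ch.length - 1) 0) (ch.length - 1) (by omega)
      have e2 := pyGetD_append_lt l (l.getD (ch.length - 1) 0) (ch.length - 2) (by omega)
      simp only [PySem.List.pyGetD_natCast] at e1 e2
      rw [e1, e2]; omega
    simp only [hc1, hnc1, if_false, if_pos]
    by_cases hc3 : lst.getD ch.length 0 > (l ++ [l.getD (ch.length - 1) 0]).getD ch.length 0
    · simp only [hc3, ite_true, PySem.Dict.insert_insert_self]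
      refine ⟨⟨rfl, by simp; omega, by simp; omega, ?_⟩, by simp⟩
      apply inv4_update d ch 'R' _ hd
      rw [rebuild_last]
      simp
    · simp only [hc3, ite_false]
      refine ⟨⟨rfl, by simp; omega, by simp; omega, ?_⟩, by simp⟩
      apply inv4_update d ch 'P' _ hd
      rw [rebuild_last]
      rw [if_pos rfl, if_neg (by omega)]
      rw [hd (ch.length - 1) (by omega)]
  · have hc2 : l.getD (ch.length - 1) 0 ≤ l.getD (ch.length - 2) 0 + lst.getD ch.length 0 := by omega
    simp only [hc1, hc2, if_false, if_pos]
    by_cases hc3 : lst.getD ch.length 0 >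
        (l ++ [l.getD (ch.length - 2) 0 + lst.getD ch.length 0]).getD ch.length 0
    · simp only [hc3, ite_true, PySem.Dict.insert_insert_self]
      refine ⟨⟨rfl, by simp; omega, by simp; omega, ?_⟩, by simp⟩
      apply inv4_update d ch 'R' _ hd
      rw [rebuild_last]
      simp
    · simp only [hc3, ite_false]
      refine ⟨⟨rfl, by simp; omega, by simp; omega, ?_⟩, by simp⟩
      apply inv4_update d ch 'T' _ hd
      rw [rebuild_last]
      rw [if_neg (by decide), if_pos rfl, if_neg (by omega)]
      rw [rebuild_acc ch (ch.length - 2) ([] ++ [(ch.length : Int)])]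
      rw [hd (ch.length - 2) (by omega)]
      simp

theorem chain_inv (lst : List Int) :
    ∀ (k : Nat) (sA : List Int × PySem.Dict Int (List Int)) (sB : List Int × List Char),
      InvAB sA sB →
      InvAB ((PySem.List.pyRange (sB.2.length : Int) ((sB.2.length : Int) + (k : Int)) 1).foldl (stepA lst) sA)
          ((PySem.List.pyRange (sB.2.length : Int) ((sB.2.length : Int) + (k : Int)) 1).foldl (stepB lst) sB) ∧
      ((PySem.List.pyRange (sB.2.length : Int) ((sB.2.length : Int) + (k : Int)) 1).foldl (stepB lst) sB).2.length
        = sB.2.length + k := by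
  intro k
  induction k with
  | zero =>
    intro sA sB h
    rw [show ((sB.2.length : Int) + ((0 : Nat) : Int)) = (sB.2.length : Int) from by push_cast; ring]
    rw [PySem.List.pyRange_one_eq_nil (le_refl _)]
    exact ⟨h, rfl⟩
  | succ k ih =>
    intro sA sB h
    have hL : ((sB.2.length : Int)) < (sB.2.length : Int) + ((k + 1 : Nat) : Int) := by push_cast; omega
    rw [PySem.List.pyRange_one_cons hL]
    simp only [List.foldl_cons]
    obtain ⟨h', hlen'⟩ := step_inv lst sA sB h
    have ihh := ih (stepA lst sA (sB.2.length : Int)) (stepB lst sB (sB.2.length : Int)) h'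
    rw [hlen'] at ihh
    have hrange : PySem.List.pyRange ((sB.2.length : Int) + 1) ((sB.2.length : Int) + ((k + 1 : Nat) : Int)) 1
        = PySem.List.pyRange ((sB.2.length + 1 : Nat) : Int) (((sB.2.length + 1 : Nat) : Int) + (k : Int)) 1 := by
      congr 1 <;> push_cast <;> ring
    rw [hrange]
    exact ⟨ihh.1, by rw [ihh.2]; omega⟩

theorem main_equiv (lst : List Int) (hne : lst ≠ []) : indexrepeat lst = indexrepeat_alt lst := by
  by_cases h1 : PySem.List.len lst = 1
  · have h1' : lst.length = 1 := by
      rw [PySem.List.len_eq] at h1; exact_mod_cast h1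
    simp [indexrepeat, indexrepeat_alt, h1']
  · have hn : 2 ≤ lst.length := by
      have h1'' : lst.length ≠ 1 := by
        intro hh; exact h1 (by rw [PySem.List.len_eq, hh]; rfl)
      have : lst.length ≠ 0 := by simpa using hne
      omega
    simp only [indexrepeat, indexrepeat_alt, if_neg h1, PySem.List.len_eq]
    set x0 := PySem.List.pyGetD lst 0 0 with hx0
    set x1 := PySem.List.pyGetD lst 1 0 with hx1
    set sA0 : List Int × PySem.Dict Int (List Int) :=
      (if x1 > x0 then (([] ++ [x0]) ++ [x1], ((PySem.Dict.empty).insert 0 [0]).insert 1 [1])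
       else (([] ++ [x0]) ++ [x0], ((PySem.Dict.empty).insert 0 [0]).insert 1 [0])) with hsA0
    set sB0 : List Int × List Char :=
      ([x0, if x1 > x0 then x1 else x0], ['R', if x1 > x0 then 'R' else 'P']) with hsB0
    have hinv : InvAB sA0 sB0 := by
      constructor
      · by_cases hx : x1 > x0 <;> simp [hsA0, hsB0, hx]
      refine ⟨by simp [hsB0], by simp [hsB0], ?_⟩
      intro j hj
      have hjlt : j < 2 := by simp [hsB0] at hj; omega
      interval_cases j <;> by_cases hx : x1 > x0 <;>
        simp [hsA0, hsB0, hx, rebuild, PySem.Dict.getD_insert]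
    have hB2 : sB0.2.length = 2 := by simp [hsB0]
    have hch := chain_inv lst (lst.length - 2) sA0 sB0 hinv
    rw [hB2] at hch
    have hrange : PySem.List.pyRange ((2 : Nat) : Int) (((2 : Nat) : Int) + ((lst.length - 2 : Nat) : Int)) 1
        = PySem.List.pyRange 2 (lst.length : Int) 1 := by
      congr 1 <;> omega
    rw [hrange] at hch
    obtain ⟨⟨_, _, _, hd4⟩, hlen⟩ := hch
    have hlenF : (List.foldl (stepB lst) sB0 (PySem.List.pyRange 2 (lst.length : Int) 1)).2.length = lst.length := by
      rw [hlen]; omega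
    have hfin := hd4 (lst.length - 1) (by rw [hlenF]; omega)
    have hkey : ((lst.length - 1 : Nat) : Int) = (lst.length : Int) - 1 := by omega
    rw [hkey] at hfin
    have htoNat : (((lst.length : Int)) - 1).toNat = lst.length - 1 := by omega
    rw [if_neg (show ¬((lst.length : Int) = 1) by omega), if_neg (show ¬((lst.length : Int) = 1) by omega),
      htoNat]
    exact hfin

-- ===== VERDICT (by name: the statement is the Claim_ definition above) =====
theorem indexrepeat_spec : Claim_equal_indexrepeat := by
  intro lst _ hpre
  exact main_equiv lst hpre
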